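-- pv_equiv track=rewrite | github.com/binunu/coding-test-training | example-book-2/09.etc/exam_01.py | solution
-- ===== SOURCE A (Python) =====
-- def solution(prices):
--     answer = [i for i in range(len(prices)-1,-1,-1)]
--     arr=[]
--     now=0
--     for i,p in enumerate(prices):
--         while arr and p < arr[-1][1] :
--             t, price = arr.pop()
--             answer[t] = now-t
--         arr.append([i,p])
--         now+=1
--         # 하나씩 넣으면서 만약 마지막 가격보다 떨어진게 나오면 기록?
--         # 현재초 - 넣었을 때의 초를 계산
--     return answer
-- ===== SOURCE B (Python) =====
-- def solution(prices):
--     n = len(prices)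
--     answer = []
--     for i in range(n):
--         for j in range(i + 1, n):
--             if prices[j] < prices[i]:
--                 answer.append(j - i)
--                 break
--         else:
--             answer.append(n - 1 - i)
--     return answer
-- ===== Notes on version B (the rewrite author's own statement) =====
-- stated objective: simpler
-- what changed: Replaced the monotonic-stack single pass (stack of pending indices popped on each drop) with a direct nested scan: for each index, find the first later strictly smaller price.
import Mathlib
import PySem

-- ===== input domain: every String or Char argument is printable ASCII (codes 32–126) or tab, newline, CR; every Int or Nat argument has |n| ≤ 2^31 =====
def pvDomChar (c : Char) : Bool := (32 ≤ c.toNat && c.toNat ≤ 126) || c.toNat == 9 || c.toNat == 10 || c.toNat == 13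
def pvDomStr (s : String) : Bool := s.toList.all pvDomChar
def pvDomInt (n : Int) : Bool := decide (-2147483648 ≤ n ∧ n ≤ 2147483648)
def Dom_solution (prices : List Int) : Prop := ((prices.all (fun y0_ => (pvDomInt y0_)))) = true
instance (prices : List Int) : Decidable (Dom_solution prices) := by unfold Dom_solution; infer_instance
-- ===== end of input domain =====

-- B replaces A's monotonic-stack single pass by a plain nested forward scan per index (simpler to read; same return value).

-- ===== PORT A =====
-- A's `while arr and p < arr[-1][1]: t, price = arr.pop(); answer[t] = now-t`.
-- The stack `arr` (Python: append/pop at the END) is kept head-first: list head = Python's arr[-1].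
-- Python stores 2-element lists [i, p]; ported as pairs (i, p).
def solutionPop (p : Int) (now : Int) : List (Int × Int) → List Int → List (Int × Int) × List Int
  | [], answer => ([], answer)
  | (t, price) :: rest, answer =>
      if p < price then solutionPop p now rest (PySem.List.pySetD answer t (now - t))
      else ((t, price) :: rest, answer)

-- one iteration of `for i, p in enumerate(prices)`
def solutionStep (st : List Int × List (Int × Int) × Int) (ip : Int × Int) :
    List Int × List (Int × Int) × Int :=
  match st with
  | (answer, arr, now) =>
    let res := solutionPop ip.2 now arr answer
    (res.2, (ip.1, ip.2) :: res.1, now + 1)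

def solution (prices : List Int) : List Int :=
  let answer := PySem.List.pyRange ((prices.length : Int) - 1) (-1) (-1)
  let res := (PySem.List.enumerate prices 0).foldl solutionStep (answer, ([], (0 : Int)))
  res.1

-- ===== PORT B =====
-- inner `for j in range(i+1, n): if prices[j] < prices[i]: answer.append(j-i); break` with `else: answer.append(n-1-i)`
def solutionAltScan (prices : List Int) (pi : Int) (i : Int) : List Int → Int
  | [] => (prices.length : Int) - 1 - i
  | j :: js =>
      if PySem.List.pyGetD prices j 0 < pi then j - i
      else solutionAltScan prices pi i js

def solution_alt (prices : List Int) : List Int :=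
  (PySem.List.pyRange 0 (prices.length : Int) 1).map (fun i =>
    solutionAltScan prices (PySem.List.pyGetD prices i 0) i
      (PySem.List.pyRange (i + 1) (prices.length : Int) 1))

-- ===== PRECONDITION & SPEC =====
def Spec_solution (prices : List Int) (out : List Int) : Prop := out = solution_alt prices
instance (prices : List Int) (out : List Int) : Decidable (Spec_solution prices out) := by unfold Spec_solution; infer_instance

-- ===== CLAIM (what is proved, stated in full; the proofs are below) =====
def Claim_equal_solution : Prop := ∀ (prices : List Int), Dom_solution prices → Spec_solution prices (solution prices)

-- ===== LEMMAS AND PROOFS =====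

-- price at Nat index t
def pvG (prices : List Int) (t : Nat) : Int := prices.getD t 0
-- no strictly smaller price in [a, b)
def pvNoDrop (prices : List Int) (t a b : Nat) : Prop :=
  ∀ j, a ≤ j → j < b → ¬ (pvG prices j < pvG prices t)
-- some strictly smaller price exists in (t, k)
def pvDone (prices : List Int) (k t : Nat) : Prop :=
  ∃ j, t < j ∧ j < k ∧ pvG prices j < pvG prices t
-- j is the FIRST index after t with a strictly smaller price
def pvFirst (prices : List Int) (t j : Nat) : Prop :=
  t < j ∧ j < prices.length ∧ pvG prices j < pvG prices t ∧ pvNoDrop prices t (t + 1) j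

def pvF (prices : List Int) : Nat → Int × Int := fun t => ((t : Int), pvG prices t)

-- loop invariant of A after consuming the first k prices; arrIdx = stack indices, head = top
structure pvInv (prices : List Int) (k : Nat) (ans : List Int) (arrIdx : List Nat) : Prop where
  hlen : ans.length = prices.length
  hlt : ∀ t ∈ arrIdx, t < k
  hidx : arrIdx.Pairwise (· > ·)
  hsrt : arrIdx.Pairwise (fun a b => pvG prices b ≤ pvG prices a)
  hmem : ∀ t, t ∈ arrIdx ↔ t < k ∧ pvNoDrop prices t (t + 1) k
  hans1 : ∀ t j, t < prices.length → pvFirst prices t j → j < k → ans.getD t 0 = (j : Int) - t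
  hans2 : ∀ t, t < prices.length → ¬ pvDone prices k t →
      ans.getD t 0 = (prices.length : Int) - 1 - t

lemma pvFirst_unique {prices : List Int} {t j1 j2 : Nat}
    (h1 : pvFirst prices t j1) (h2 : pvFirst prices t j2) : j1 = j2 := by
  rcases h1 with ⟨ht1, hn1, hd1, hnd1⟩
  rcases h2 with ⟨ht2, hn2, hd2, hnd2⟩
  by_contra hne
  rcases Nat.lt_or_ge j1 j2 with h | h
  · exact hnd2 j1 (by omega) h hd1
  · exact hnd1 j2 (by omega) (by omega) hd2

lemma pv_popAll_eq (p now : Int) (arr : List (Int × Int)) (ans : List Int) :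
    solutionPop p now arr ans =
      (arr.dropWhile (fun tp => decide (p < tp.2)),
       (arr.takeWhile (fun tp => decide (p < tp.2))).foldl
         (fun a tp => PySem.List.pySetD a tp.1 (now - tp.1)) ans) := by
  
  induction arr generalizing ans with
  | nil => simp [solutionPop]
  | cons hd tl ih =>
    obtain ⟨t, price⟩ := hd
    by_cases h : p < price
    · simp [solutionPop, h, ih]
    · simp [solutionPop, h]

lemma pv_foldl_set_length (v : Nat → Int) (l : List Nat) (ans : List Int) :
    (l.foldl (fun a s => a.set s (v s)) ans).length = ans.length := by
  
  induction l generalizing ans with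
  | nil => rfl
  | cons s l ih => simp [List.foldl_cons, ih]

lemma pv_foldl_set_getD (v : Nat → Int) (l : List Nat) (ans : List Int) (t : Nat)
    (hl : ∀ s ∈ l, s < ans.length) :
    (l.foldl (fun a s => a.set s (v s)) ans).getD t 0 =
      if t ∈ l then v t else ans.getD t 0 := by
  
  induction l generalizing ans with
  | nil => simp
  | cons s l ih =>
    simp only [List.foldl_cons]
    rw [ih _ (fun x hx => by simpa using hl x (List.mem_cons_of_mem _ hx))]
    by_cases htl : t ∈ l
    · simp [htl]
    · by_cases hts : t = s
      · subst hts
        have ht : t < ans.length := hl t (List.mem_cons_self ..)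
        simp [htl, List.getD_eq_getElem?_getD, ht]
      · simp [htl, hts, List.getD_eq_getElem?_getD, List.getElem?_set_ne (Ne.symm hts)]

-- every element surviving the pops has price ≤ p (uses stack price sortedness)
lemma pv_kept_le (prices : List Int) (p : Int) (arrIdx : List Nat)
    (hs : arrIdx.Pairwise (fun a b => pvG prices b ≤ pvG prices a)) :
    ∀ t ∈ arrIdx.dropWhile (fun t => decide (p < pvG prices t)), ¬ (p < pvG prices t) := by
  
  intro t ht
  cases hdw : arrIdx.dropWhile (fun t => decide (p < pvG prices t)) with
  | nil => simp [hdw] at ht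
  | cons a l =>
    have ha : ¬ (p < pvG prices a) := by
      have := List.head_dropWhile_not (fun t => decide (p < pvG prices t)) (l := arrIdx)
        (by simp [hdw])
      simp [hdw] at this; omega
    have hpw : (a :: l).Pairwise (fun a b => pvG prices b ≤ pvG prices a) := by
      rw [← hdw]; exact hs.sublist (List.dropWhile_sublist _)
    rw [hdw] at ht
    rcases List.mem_cons.mp ht with rfl | htl
    · omega
    · have hle := (List.pairwise_cons.mp hpw).1 t htl
      omega

lemma pv_step_inv (prices : List Int) (k : Nat) (ans : List Int) (arrIdx : List Nat)
    (hk : k < prices.length) (h : pvInv prices k ans arrIdx) :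
    pvInv prices (k + 1)
      ((arrIdx.takeWhile (fun t => decide (pvG prices k < pvG prices t))).foldl
        (fun a s => a.set s ((k : Int) - s)) ans)
      (k :: arrIdx.dropWhile (fun t => decide (pvG prices k < pvG prices t))) := by
  classical
  obtain ⟨hlen, hlt, hidx, hsrt, hmem, hans1, hans2⟩ := h
  set q : Nat → Bool := fun t => decide (pvG prices k < pvG prices t) with hq
  have hkept := pv_kept_le prices (pvG prices k) arrIdx hsrt
  have hpop : ∀ t ∈ arrIdx.takeWhile q, pvG prices k < pvG prices t := by
    intro t ht; have := List.mem_takeWhile_imp ht; simpa [hq] using this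
  have hsubk : ∀ t ∈ arrIdx.dropWhile q, t ∈ arrIdx :=
    fun t ht => (List.dropWhile_sublist _).subset ht
  have hsubp : ∀ t ∈ arrIdx.takeWhile q, t ∈ arrIdx :=
    fun t ht => (List.takeWhile_sublist _).subset ht
  have hkmem : ∀ t, t ∈ arrIdx.dropWhile q ↔ (t ∈ arrIdx ∧ ¬ (pvG prices k < pvG prices t)) := by
    intro t; constructor
    · intro ht; exact ⟨hsubk t ht, hkept t ht⟩
    · rintro ⟨hta, htd⟩
      rcases List.mem_append.mp
          (show t ∈ arrIdx.takeWhile q ++ arrIdx.dropWhile q by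
            rw [List.takeWhile_append_dropWhile]; exact hta) with h1 | h2
      · exact absurd (hpop t h1) htd
      · exact h2
  have hlset : ∀ s ∈ arrIdx.takeWhile q, s < ans.length := by
    intro s hs; rw [hlen]; have := hlt s (hsubp s hs); omega
  refine ⟨?_, ?_, ?_, ?_, ?_, ?_, ?_⟩
  · rw [pv_foldl_set_length]; exact hlen
  · intro t ht
    rcases List.mem_cons.mp ht with rfl | h2
    · omega
    · have := hlt t (hsubk t h2); omega
  · refine List.pairwise_cons.mpr ⟨?_, hidx.sublist (List.dropWhile_sublist _)⟩
    intro t ht; exact hlt t (hsubk t ht)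
  · refine List.pairwise_cons.mpr ⟨?_, hsrt.sublist (List.dropWhile_sublist _)⟩
    intro t ht; have := hkept t ht; omega
  · intro t; constructor
    · intro ht
      rcases List.mem_cons.mp ht with rfl | h2
      · exact ⟨by omega, fun j h1 h2 => by omega⟩
      · obtain ⟨hta, htd⟩ := (hkmem t).mp h2
        obtain ⟨htk, hnd⟩ := (hmem t).mp hta
        refine ⟨by omega, ?_⟩
        intro j h1 h2 hdrop
        by_cases hj : j < k
        · exact hnd j h1 hj hdrop
        · have hjk : j = k := by omega
          subst hjk; exact htd hdrop
    · rintro ⟨htk, hnd⟩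
      by_cases htk' : t = k
      · subst htk'; exact List.mem_cons_self ..
      · have htk2 : t < k := by omega
        have hta : t ∈ arrIdx := (hmem t).mpr ⟨htk2, fun j h1 h2 => hnd j h1 (by omega)⟩
        have htd : ¬ (pvG prices k < pvG prices t) := hnd k (by omega) (by omega)
        exact List.mem_cons_of_mem _ ((hkmem t).mpr ⟨hta, htd⟩)
  · intro t j ht hfirst hjk
    rw [pv_foldl_set_getD _ _ _ _ hlset]
    by_cases hp : t ∈ arrIdx.takeWhile q
    · have hfk : pvFirst prices t k := by
        obtain ⟨htk, hnd⟩ := (hmem t).mp (hsubp t hp)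
        exact ⟨htk, hk, hpop t hp, hnd⟩
      have hjeq := pvFirst_unique hfirst hfk
      subst hjeq
      simp [hp]
    · simp only [hp, ite_false]
      by_cases hjk2 : j < k
      · exact hans1 t j ht hfirst hjk2
      · have hjk3 : j = k := by omega
        subst hjk3
        obtain ⟨htj, hjn, hdrop, hnd⟩ := hfirst
        have hta : t ∈ arrIdx := (hmem t).mpr ⟨htj, hnd⟩
        exfalso
        rcases List.mem_append.mp
            (show t ∈ arrIdx.takeWhile q ++ arrIdx.dropWhile q by
              rw [List.takeWhile_append_dropWhile]; exact hta) with h1 | h2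
        · exact hp h1
        · exact (hkept t h2) hdrop
  · intro t ht hnd
    rw [pv_foldl_set_getD _ _ _ _ hlset]
    have hp : t ∉ arrIdx.takeWhile q := by
      intro hp
      exact hnd ⟨k, by have := hlt t (hsubp t hp); omega, by omega, hpop t hp⟩
    simp only [hp, ite_false]
    exact hans2 t ht (fun ⟨j, h1, h2, h3⟩ => hnd ⟨j, h1, by omega, h3⟩)

lemma pv_step_eq (prices : List Int) (k : Nat) (ans : List Int) (arrIdx : List Nat) :
    solutionStep (ans, arrIdx.map (pvF prices), (k : Int)) ((k : Int), prices.getD k 0) =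
      ((arrIdx.takeWhile (fun t => decide (pvG prices k < pvG prices t))).foldl
        (fun a s => a.set s ((k : Int) - s)) ans,
       (k :: arrIdx.dropWhile (fun t => decide (pvG prices k < pvG prices t))).map (pvF prices),
       ((k + 1 : Nat) : Int)) := by
  simp [solutionStep, pv_popAll_eq, List.takeWhile_map, List.dropWhile_map, List.foldl_map,
    pvF, pvG, Function.comp_def]

lemma pv_loop (prices : List Int) :
    ∀ (rest : List Int) (k : Nat) (ans : List Int) (arrIdx : List Nat),
      rest = prices.drop k → k ≤ prices.length → pvInv prices k ans arrIdx →
      ∃ ans' arrIdx',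
        (PySem.List.enumerate rest (k : Int)).foldl solutionStep
            (ans, arrIdx.map (pvF prices), (k : Int)) =
          (ans', arrIdx'.map (pvF prices), ((prices.length : Nat) : Int)) ∧
        pvInv prices prices.length ans' arrIdx' := by
  intro rest
  induction rest with
  | nil =>
    intro k ans arrIdx hrest hk hinv
    have hlen0 : prices.length ≤ k := by
      have := congrArg List.length hrest
      simp at this; omega
    have hkn : k = prices.length := by omega
    subst hkn
    exact ⟨ans, arrIdx, by simp [PySem.List.enumerate], hinv⟩
  | cons p rest' ih =>
    intro k ans arrIdx hrest hk hinv
    have hlenr : (p :: rest').length = prices.length - k := by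
      rw [hrest]; simp
    have hkn : k < prices.length := by simp at hlenr; omega
    have hp : prices.getD k 0 = p := by
      have h0 : (prices.drop k)[0]? = prices[k]? := by
        rw [List.getElem?_drop]; simp
      rw [← hrest] at h0
      simp at h0
      simp [List.getD_eq_getElem?_getD, ← h0]
    have hrest' : rest' = prices.drop (k + 1) := by
      rw [← List.tail_drop, ← hrest]; rfl
    rw [PySem.List.enumerate_cons, List.foldl_cons]
    rw [show solutionStep (ans, arrIdx.map (pvF prices), (k : Int)) ((k : Int), p) =
        ((arrIdx.takeWhile (fun t => decide (pvG prices k < pvG prices t))).foldl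
          (fun a s => a.set s ((k : Int) - s)) ans,
         (k :: arrIdx.dropWhile (fun t => decide (pvG prices k < pvG prices t))).map (pvF prices),
         ((k + 1 : Nat) : Int)) from by rw [← hp]; exact pv_step_eq prices k ans arrIdx]
    have hinv' := pv_step_inv prices k ans arrIdx hkn hinv
    have hres := ih (k + 1) _ _ hrest' (by omega) hinv'
    rw [show (k : Int) + 1 = ((k + 1 : Nat) : Int) by push_cast; ring]
    exact hres

lemma pv_init (prices : List Int) :
    pvInv prices 0 (PySem.List.pyRange ((prices.length : Int) - 1) (-1) (-1)) [] := by
  have hlen : (PySem.List.pyRange ((prices.length : Int) - 1) (-1) (-1)).length = prices.length := by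
    rw [PySem.List.length_pyRange_neg_one]; omega
  refine ⟨hlen, by simp, List.Pairwise.nil, List.Pairwise.nil, ?_, ?_, ?_⟩
  · intro t; simp
  · intro t j ht hf hj; omega
  · intro t ht hnd
    rw [PySem.List.pyRange_neg_one]
    have htoNat : (((prices.length : Int) - 1) - (-1)).toNat = prices.length := by omega
    rw [htoNat]
    simp [List.getD_eq_getElem?_getD, ht]

lemma pv_solution_inv (prices : List Int) :
    ∃ arrIdx', pvInv prices prices.length (solution prices) arrIdx' := by
  obtain ⟨ans', arrIdx', heq, hinv⟩ :=
    pv_loop prices prices 0 (PySem.List.pyRange ((prices.length : Int) - 1) (-1) (-1)) []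
      (by simp) (by omega) (pv_init prices)
  simp only [List.map_nil, Nat.cast_zero] at heq
  refine ⟨arrIdx', ?_⟩
  have hs : solution prices =
      ((PySem.List.enumerate prices 0).foldl solutionStep
        (PySem.List.pyRange ((prices.length : Int) - 1) (-1) (-1), ([], (0 : Int)))).1 := rfl
  rw [hs, heq]
  exact hinv

-- B-side characterisation of the inner scan
lemma pv_scan_nodrop (prices : List Int) (t : Nat) :
    ∀ jn : Nat, pvNoDrop prices t jn prices.length →
      solutionAltScan prices (pvG prices t) (t : Int)
          (PySem.List.pyRange (jn : Int) (prices.length : Int) 1) =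
        (prices.length : Int) - 1 - t := by
  suffices H : ∀ fuel jn, prices.length - jn ≤ fuel → pvNoDrop prices t jn prices.length →
      solutionAltScan prices (pvG prices t) (t : Int)
          (PySem.List.pyRange (jn : Int) (prices.length : Int) 1) =
        (prices.length : Int) - 1 - t by
    intro jn hnd; exact H prices.length jn (by omega) hnd
  intro fuel
  induction fuel with
  | zero =>
    intro jn hf hnd
    rw [PySem.List.pyRange_one_eq_nil (by exact_mod_cast Nat.le_of_sub_eq_zero (by omega))]
    rfl
  | succ fuel ihf =>
    intro jn hf hnd
    by_cases hjn : jn < prices.length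
    · rw [PySem.List.pyRange_one_cons (by exact_mod_cast hjn)]
      have hno : ¬ (PySem.List.pyGetD prices (jn : Int) 0 < pvG prices t) := by
        have := hnd jn (by omega) hjn
        simpa [pvG] using this
      simp only [solutionAltScan, hno, ite_false]
      rw [show (jn : Int) + 1 = ((jn + 1 : Nat) : Int) by push_cast; ring]
      exact ihf (jn + 1) (by omega) (fun j h1 h2 => hnd j (by omega) h2)
    · rw [PySem.List.pyRange_one_eq_nil (by exact_mod_cast by omega)]
      rfl

lemma pv_scan_first (prices : List Int) (t : Nat) :
    ∀ jn jd : Nat, jn ≤ jd → jd < prices.length → pvG prices jd < pvG prices t →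
      pvNoDrop prices t jn jd →
      solutionAltScan prices (pvG prices t) (t : Int)
          (PySem.List.pyRange (jn : Int) (prices.length : Int) 1) =
        (jd : Int) - t := by
  suffices H : ∀ fuel jn jd, jd - jn ≤ fuel → jn ≤ jd → jd < prices.length →
      pvG prices jd < pvG prices t → pvNoDrop prices t jn jd →
      solutionAltScan prices (pvG prices t) (t : Int)
          (PySem.List.pyRange (jn : Int) (prices.length : Int) 1) =
        (jd : Int) - t by
    intro jn jd h1 h2 h3 h4; exact H jd jn jd (by omega) h1 h2 h3 h4
  intro fuel
  induction fuel with
  | zero =>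
    intro jn jd hf hle hjd hdrop hnd
    have hj : jn = jd := by omega
    subst hj
    rw [PySem.List.pyRange_one_cons (by exact_mod_cast hjd)]
    have hy : PySem.List.pyGetD prices (jn : Int) 0 < pvG prices t := by simpa [pvG] using hdrop
    simp only [solutionAltScan, hy, ite_true]
  | succ fuel ihf =>
    intro jn jd hf hle hjd hdrop hnd
    by_cases hj : jn = jd
    · subst hj
      rw [PySem.List.pyRange_one_cons (by exact_mod_cast hjd)]
      have hy : PySem.List.pyGetD prices (jn : Int) 0 < pvG prices t := by simpa [pvG] using hdrop
      simp only [solutionAltScan, hy, ite_true]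
    · have hjlt : jn < jd := by omega
      rw [PySem.List.pyRange_one_cons (by exact_mod_cast by omega : (jn : Int) < prices.length)]
      have hno : ¬ (PySem.List.pyGetD prices (jn : Int) 0 < pvG prices t) := by
        have := hnd jn (by omega) hjlt
        simpa [pvG] using this
      simp only [solutionAltScan, hno, ite_false]
      rw [show (jn : Int) + 1 = ((jn + 1 : Nat) : Int) by push_cast; ring]
      exact ihf (jn + 1) jd (by omega) (by omega) hjd hdrop (fun j h1 h2 => hnd j (by omega) h2)

lemma pv_length_solution (prices : List Int) : (solution prices).length = prices.length := by
  obtain ⟨arrIdx, hinv⟩ := pv_solution_inv prices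
  exact hinv.hlen

lemma pv_length_alt (prices : List Int) : (solution_alt prices).length = prices.length := by
  simp [solution_alt, PySem.List.length_pyRange_one]

-- ===== VERDICT (by name: the statement is the Claim_ definition above) =====
theorem solution_spec : Claim_equal_solution := by
  intro prices _
  unfold Spec_solution
  obtain ⟨arrIdx, hinv⟩ := pv_solution_inv prices
  apply List.ext_getElem (by rw [pv_length_solution, pv_length_alt])
  intro t h1 h2
  have htn : t < prices.length := by rw [pv_length_solution] at h1; exact h1
  rw [← List.getD_eq_getElem (solution prices) 0 h1, ← List.getD_eq_getElem (solution_alt prices) 0 h2]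
  have hB : (solution_alt prices).getD t 0 =
      solutionAltScan prices (pvG prices t) (t : Int)
        (PySem.List.pyRange (((t + 1 : Nat)) : Int) (prices.length : Int) 1) := by
    have hlt2 : t < (PySem.List.pyRange 0 (prices.length : Int) 1).length := by
      rw [PySem.List.length_pyRange_one]; omega
    rw [List.getD_eq_getElem (solution_alt prices) 0 h2]
    simp only [solution_alt, List.getElem_map, PySem.List.getElem_pyRange_one]
    have hz : (0 : Int) + (t : Int) = (t : Int) := by ring
    rw [hz]
    have hc : ((t : Int) + 1) = (((t + 1 : Nat)) : Int) := by push_cast; ring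
    rw [hc]
    simp [pvG]
  rw [hB]
  by_cases hd : pvDone prices prices.length t
  · have hex : ∃ j, t < j ∧ j < prices.length ∧ pvG prices j < pvG prices t := hd
    obtain ⟨hj1, hj2, hj3⟩ := Nat.find_spec hex
    have hfirst : pvFirst prices t (Nat.find hex) :=
      ⟨hj1, hj2, hj3, fun j' ha hb hdrop => Nat.find_min hex hb ⟨by omega, by omega, hdrop⟩⟩
    rw [hinv.hans1 t (Nat.find hex) htn hfirst hj2]
    rw [pv_scan_first prices t (t + 1) (Nat.find hex) (by omega) hj2 hj3
      (fun j' ha hb => hfirst.2.2.2 j' ha hb)]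
  · rw [hinv.hans2 t htn hd]
    rw [pv_scan_nodrop prices t (t + 1) (fun j ha hb hdrop => hd ⟨j, by omega, hb, hdrop⟩)]
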